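-- pv_equiv track=rewrite | github.com/AsselK1/Personal-experience | yandex/day_2/B.py | what_mode
-- ===== SOURCE A (Python) =====
-- def what_mode(arr):
--     if len(arr) == 1:
--         return "CONSTANT"
--
--     if arr[0] == arr[1]:
--         mode = "CONSTANT"
--
--     if arr[0] < arr[1]:
--         mode = "ASCENDING"
--
--     if arr[0] > arr[1]:
--         mode = "DESCENDING"
--
--     for i in range(len(arr) - 1):
--         if arr[i] == arr[i + 1]:
--             if mode == "ASCENDING":
--                 mode = "WEAKLY ASCENDING"
--             elif mode == "DESCENDING":
--                 mode = "WEAKLY DESCENDING"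
--         if arr[i] < arr[i + 1]:
--             if mode == "CONSTANT":
--                 mode = "WEAKLY ASCENDING"
--             if mode == "DESCENDING" or mode == "WEAKLY DESCENDING":
--                 mode = "RANDOM"
--         if arr[i] > arr[i + 1]:
--             if mode == "CONSTANT":
--                 mode = "WEAKLY DESCENDING"
--             if mode == "ASCENDING" or mode == "WEAKLY ASCENDING":
--                 mode = "RANDOM"
--     return mode
-- ===== SOURCE B (Python) =====
-- def what_mode(arr):
--     prev = arr[0]
--     saw_eq = saw_lt = saw_gt = False
--     for cur in arr[1:]:
--         if cur == prev:
--             saw_eq = True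
--         elif cur > prev:
--             saw_lt = True
--         else:
--             saw_gt = True
--         prev = cur
--     if saw_lt and saw_gt:
--         return "RANDOM"
--     if saw_lt:
--         return "WEAKLY ASCENDING" if saw_eq else "ASCENDING"
--     if saw_gt:
--         return "WEAKLY DESCENDING" if saw_eq else "DESCENDING"
--     return "CONSTANT"
-- ===== Notes on version B (the rewrite author's own statement) =====
-- stated objective: simpler
-- what changed: Replaces A's evolving six-state string finite-state machine (with its separate first-pair initialisation and a loop re-scanning the first pair) by one pass collecting three booleans saw_eq/saw_lt/saw_gt plus a final decision tree.
import Mathlib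
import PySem

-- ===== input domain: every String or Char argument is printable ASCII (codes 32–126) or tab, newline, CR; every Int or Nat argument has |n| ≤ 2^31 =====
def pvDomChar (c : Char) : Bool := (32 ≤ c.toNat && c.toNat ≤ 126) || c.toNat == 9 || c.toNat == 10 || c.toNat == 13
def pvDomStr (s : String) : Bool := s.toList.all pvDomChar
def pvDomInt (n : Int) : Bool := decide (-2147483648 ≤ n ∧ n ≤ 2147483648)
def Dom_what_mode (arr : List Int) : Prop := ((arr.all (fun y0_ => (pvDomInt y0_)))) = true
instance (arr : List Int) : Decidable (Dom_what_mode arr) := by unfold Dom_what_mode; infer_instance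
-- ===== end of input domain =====

-- B replaces A's evolving string finite-state machine by one pass collecting three
-- booleans (saw equal / saw increase / saw decrease) plus a final decision tree (objective: simpler).

-- ===== PORT A =====
-- loop body of A's `for i in range(len(arr)-1)`: the three sequential ifs, in Python's order.
-- arr[i] / arr[i+1] are ported with pyGetD 0: exact, since i and i+1 are always in range here.
def what_mode_step (arr : List Int) (mode : String) (i : Int) : String :=
  let x := PySem.List.pyGetD arr i 0
  let y := PySem.List.pyGetD arr (i + 1) 0
  let mode :=
    if x == y then
      if mode == "ASCENDING" then "WEAKLY ASCENDING"
      else if mode == "DESCENDING" then "WEAKLY DESCENDING"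
      else mode
    else mode
  let mode :=
    if x < y then
      let mode := if mode == "CONSTANT" then "WEAKLY ASCENDING" else mode
      if mode == "DESCENDING" || mode == "WEAKLY DESCENDING" then "RANDOM" else mode
    else mode
  let mode :=
    if x > y then
      let mode := if mode == "CONSTANT" then "WEAKLY DESCENDING" else mode
      if mode == "ASCENDING" || mode == "WEAKLY ASCENDING" then "RANDOM" else mode
    else mode
  mode

def what_mode (arr : List Int) : String :=
  if arr.length == 1 then "CONSTANT"
  else
    -- A's three initial ifs are mutually exclusive, so the chain is the same assignment;
    -- on the empty list Python raises IndexError here (excluded by Pre_what_mode).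
    let a0 := PySem.List.pyGetD arr 0 0
    let a1 := PySem.List.pyGetD arr 1 0
    let mode :=
      if a0 == a1 then "CONSTANT"
      else if a0 < a1 then "ASCENDING"
      else "DESCENDING"
    (PySem.List.pyRange 0 ((arr.length : Int) - 1) 1).foldl (what_mode_step arr) mode

-- ===== PORT B =====
-- B's loop body: update (prev, saw_eq, saw_lt, saw_gt) from one element of arr[1:].
def what_mode_alt_step (st : Int × Bool × Bool × Bool) (cur : Int) : Int × Bool × Bool × Bool :=
  let (prev, se, sl, sg) := st
  if cur == prev then (cur, true, sl, sg)
  else if cur > prev then (cur, se, true, sg)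
  else (cur, se, sl, true)

def what_mode_alt (arr : List Int) : String :=
  -- prev = arr[0] (raises on []; excluded by Pre_what_mode); arr[1:] = arr.drop 1
  let prev := PySem.List.pyGetD arr 0 0
  let st := (arr.drop 1).foldl what_mode_alt_step (prev, false, false, false)
  let (_, se, sl, sg) := st
  if sl && sg then "RANDOM"
  else if sl then (if se then "WEAKLY ASCENDING" else "ASCENDING")
  else if sg then (if se then "WEAKLY DESCENDING" else "DESCENDING")
  else "CONSTANT"

-- ===== PRECONDITION & SPEC =====
-- Pre_ excludes only the empty list, where Python A (and B) raise IndexError on arr[0].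
def Pre_what_mode (arr : List Int) : Prop := arr ≠ []
instance (arr : List Int) : Decidable (Pre_what_mode arr) := by unfold Pre_what_mode; infer_instance
def pvWitness_what_mode : List Int := [1, 2, 2, 3]

def Spec_what_mode (arr : List Int) (out : String) : Prop := out = what_mode_alt arr
instance (arr : List Int) (out : String) : Decidable (Spec_what_mode arr out) := by unfold Spec_what_mode; infer_instance

-- ===== CLAIM (what is proved, stated in full; the proofs are below) =====
def Claim_equal_what_mode : Prop := ∀ (arr : List Int), Dom_what_mode arr → Pre_what_mode arr → Spec_what_mode arr (what_mode arr)

-- ===== LEMMAS AND PROOFS =====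

-- flags abstraction: (saw_eq, saw_lt, saw_gt) ↦ the final answer of B's decision tree
def pvClassify (fl : Bool × Bool × Bool) : String :=
  let (se, sl, sg) := fl
  if sl && sg then "RANDOM"
  else if sl then (if se then "WEAKLY ASCENDING" else "ASCENDING")
  else if sg then (if se then "WEAKLY DESCENDING" else "DESCENDING")
  else "CONSTANT"

-- flag update for one adjacent pair (prev, cur)
def pvUpd (fl : Bool × Bool × Bool) (x y : Int) : Bool × Bool × Bool :=
  let (se, sl, sg) := fl
  if y == x then (true, sl, sg)
  else if y > x then (se, true, sg)
  else (se, sl, true)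

-- A's loop body as a function of the pair values
def pvStepA (mode : String) (x y : Int) : String :=
  let mode :=
    if x == y then
      if mode == "ASCENDING" then "WEAKLY ASCENDING"
      else if mode == "DESCENDING" then "WEAKLY DESCENDING"
      else mode
    else mode
  let mode :=
    if x < y then
      let mode := if mode == "CONSTANT" then "WEAKLY ASCENDING" else mode
      if mode == "DESCENDING" || mode == "WEAKLY DESCENDING" then "RANDOM" else mode
    else mode
  if x > y then
    let mode := if mode == "CONSTANT" then "WEAKLY DESCENDING" else mode
    if mode == "ASCENDING" || mode == "WEAKLY ASCENDING" then "RANDOM" else mode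
  else mode

theorem pvUpd_ne (fl : Bool × Bool × Bool) (x y : Int) :
    pvUpd fl x y ≠ (false, false, false) := by
  obtain ⟨se, sl, sg⟩ := fl
  unfold pvUpd
  split_ifs <;> simp

-- the FSM step commutes with the flag update, once at least one flag is set
theorem pvCommute (fl : Bool × Bool × Bool) (hfl : fl ≠ (false, false, false)) (x y : Int) :
    pvStepA (pvClassify fl) x y = pvClassify (pvUpd fl x y) := by
  obtain ⟨se, sl, sg⟩ := fl
  rcases lt_trichotomy x y with h | h | h
  · simp only [pvStepA, pvUpd, pvClassify, beq_iff_eq, h, h.ne, h.ne', h.asymm]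
    rcases se <;> rcases sl <;> rcases sg <;> simp_all
  · subst h
    simp only [pvStepA, pvUpd, pvClassify, beq_iff_eq, lt_irrefl]
    rcases se <;> rcases sl <;> rcases sg <;> simp_all
  · simp only [pvStepA, pvUpd, pvClassify, beq_iff_eq, h, h.ne, h.ne', h.asymm]
    rcases se <;> rcases sl <;> rcases sg <;> simp_all

-- running A's FSM over any pair list from a state with a flag set = classifying the folded flags
theorem pvRun (ps : List (Int × Int)) :
    ∀ (fl : Bool × Bool × Bool), fl ≠ (false, false, false) →
      ps.foldl (fun m q => pvStepA m q.1 q.2) (pvClassify fl)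
        = pvClassify (ps.foldl (fun fl q => pvUpd fl q.1 q.2) fl) := by
  induction ps with
  | nil => intro fl _; rfl
  | cons q t ih =>
      intro fl hfl
      simp only [List.foldl_cons, pvCommute fl hfl q.1 q.2]
      exact ih _ (pvUpd_ne fl q.1 q.2)

-- A's first step, from A's initial mode, equals the flag update from the all-false flags
theorem pvFirst (x y : Int) :
    pvStepA (if x == y then "CONSTANT" else if x < y then "ASCENDING" else "DESCENDING") x y
      = pvClassify (pvUpd (false, false, false) x y) := by
  rcases lt_trichotomy x y with h | h | h
  · simp [pvStepA, pvUpd, pvClassify, beq_iff_eq, h, h.ne, h.ne', h.asymm]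
  · subst h
    simp [pvStepA, pvUpd, pvClassify]
  · simp [pvStepA, pvUpd, pvClassify, beq_iff_eq, h, h.ne, h.ne', h.asymm]

-- A's index loop is a fold over the adjacent-pair list
theorem pvPairs_eq (xs : List Int) :
    (PySem.List.pyRange 0 ((xs.length : Int) - 1) 1).map
        (fun i => (PySem.List.pyGetD xs i 0, PySem.List.pyGetD xs (i + 1) 0))
      = xs.zip (xs.drop 1) := by
  apply List.ext_getElem
  · simp [PySem.List.length_pyRange_one]
  · intro i h1 h2
    have hlen : i < xs.length - 1 := by
      simp [PySem.List.length_pyRange_one] at h1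
      omega
    simp only [List.getElem_map, PySem.List.getElem_pyRange_one, List.getElem_zip,
      List.getElem_drop]
    have h0 : PySem.List.pyGetD xs ((0 : Int) + (i : Int)) 0 = xs[i] := by
      rw [show (0 : Int) + (i : Int) = ((i : Nat) : Int) by omega,
        PySem.List.pyGetD_natCast, List.getD_eq_getElem?_getD, List.getElem?_eq_getElem (by omega)]
      rfl
    have h1' : PySem.List.pyGetD xs ((0 : Int) + (i : Int) + 1) 0 = xs[1 + i] := by
      rw [show (0 : Int) + (i : Int) + 1 = (((1 + i : Nat)) : Int) by omega,
        PySem.List.pyGetD_natCast, List.getD_eq_getElem?_getD, List.getElem?_eq_getElem (by omega)]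
      rfl
    rw [h0, h1']

theorem pvFoldA (xs : List Int) (m : String) :
    (PySem.List.pyRange 0 ((xs.length : Int) - 1) 1).foldl (what_mode_step xs) m
      = (xs.zip (xs.drop 1)).foldl (fun acc q => pvStepA acc q.1 q.2) m := by
  rw [← pvPairs_eq, List.foldl_map]
  rfl

-- B's one-element step, as a function of the pair values
theorem pvStepB_eq (p c : Int) (fl : Bool × Bool × Bool) :
    what_mode_alt_step (p, fl) c = (c, pvUpd fl p c) := by
  obtain ⟨se, sl, sg⟩ := fl
  simp only [what_mode_alt_step, pvUpd]
  rcases lt_trichotomy p c with h | h | h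
  · simp [beq_iff_eq, h, h.ne']
  · subst h; simp
  · simp [beq_iff_eq, h.ne, h.asymm]

-- B's fold carrying (prev, flags) = flag fold over the adjacent-pair list
theorem pvFoldB (t : List Int) :
    ∀ (p : Int) (fl : Bool × Bool × Bool),
      (t.foldl what_mode_alt_step (p, fl)).2
        = ((p :: t).zip t).foldl (fun fl q => pvUpd fl q.1 q.2) fl := by
  induction t with
  | nil => intro p fl; rfl
  | cons c t ih =>
      intro p fl
      simp only [List.foldl_cons, List.zip_cons_cons, pvStepB_eq, ih]

-- B's final decision tree is pvClassify of the folded flags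
theorem pvAlt_eq (arr : List Int) :
    what_mode_alt arr
      = pvClassify ((arr.drop 1).foldl what_mode_alt_step
          (PySem.List.pyGetD arr 0 0, false, false, false)).2 := by
  unfold what_mode_alt pvClassify
  rcases h : (arr.drop 1).foldl what_mode_alt_step (PySem.List.pyGetD arr 0 0, false, false, false)
    with ⟨p, se, sl, sg⟩
  simp only [h]

theorem what_mode_eq (arr : List Int) (h : arr ≠ []) : what_mode arr = what_mode_alt arr := by
  obtain ⟨a, rest, rfl⟩ := List.exists_cons_of_ne_nil h
  cases rest with
  | nil => rfl
  | cons b t =>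
      rw [pvAlt_eq]
      have hlen : ((a :: b :: t).length == 1) = false := by simp
      unfold what_mode
      rw [hlen]
      simp only [Bool.false_eq_true, if_false, pvFoldA]
      have hp0 : PySem.List.pyGetD (a :: b :: t) 0 0 = a := by
        rw [show (0 : Int) = ((0 : Nat) : Int) from rfl, PySem.List.pyGetD_natCast]; rfl
      have hp1 : PySem.List.pyGetD (a :: b :: t) 1 0 = b := by
        rw [show (1 : Int) = ((1 : Nat) : Int) from rfl, PySem.List.pyGetD_natCast]; rfl
      rw [hp0, hp1]
      have hzip : (a :: b :: t).zip ((a :: b :: t).drop 1) = ((a, b) :: ((b :: t).zip t)) := by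
        simp
      rw [hzip, List.foldl_cons]
      show ((a, b) :: ((b :: t).zip t)).foldl (fun acc q => pvStepA acc q.1 q.2)
          (if a == b then "CONSTANT" else if a < b then "ASCENDING" else "DESCENDING") = _
      rw [List.foldl_cons]
      show (((b :: t).zip t)).foldl (fun acc q => pvStepA acc q.1 q.2)
          (pvStepA (if a == b then "CONSTANT" else if a < b then "ASCENDING" else "DESCENDING") a b) = _
      rw [pvFirst, pvRun _ _ (pvUpd_ne (false, false, false) a b)]
      simp only [List.drop_succ_cons, List.drop_zero, List.foldl_cons, pvStepB_eq, pvFoldB]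

-- ===== VERDICT (by name: the statement is the Claim_ definition above) =====
theorem what_mode_spec : Claim_equal_what_mode := by
  intro arr _ hpre
  exact what_mode_eq arr hpre
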